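-- pv_equiv track=rewrite | github.com/dohui-son/Python-Algorithms | programmers/k비밀지도_bitmask.py | solution
-- ===== SOURCE A (Python) =====
-- def solution(n, arr1, arr2):
--     ans = []
--     for y in range(n):
--         st = ""
--         total = (1<<n)-1
--         bit = arr1[y] | arr2[y]
--         for i in range(n):
--             if (1<<i)&bit: st+="#"
--             else: st+=" "
--         ans.append(st[::-1])
--
--     return ans
-- ===== SOURCE B (Python) =====
-- _TBL = str.maketrans("01", " #")
--
--
-- def solution(n, arr1, arr2):
--     # render each merged row via binary string formatting instead of a per-bit loop
--     if n <= 0: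
--         return []
--     mask = (1 << n) - 1
--     return [format((a | b) & mask, "0%db" % n).translate(_TBL)
--             for a, b in zip(arr1[:n], arr2[:n])]
-- ===== Notes on version B (the rewrite author's own statement) =====
-- stated objective: faster
-- what changed: B masks each merged row to n bits and renders it by binary string formatting (format to a zero-padded bit string, then a character translation table) instead of A's indexed per-bit (1<<i)&bit loop that builds the string backwards and reverses it; the per-bit Python-level inner loop is replaced by C-implemented int formatting and str.translate.
import Mathlib
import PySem

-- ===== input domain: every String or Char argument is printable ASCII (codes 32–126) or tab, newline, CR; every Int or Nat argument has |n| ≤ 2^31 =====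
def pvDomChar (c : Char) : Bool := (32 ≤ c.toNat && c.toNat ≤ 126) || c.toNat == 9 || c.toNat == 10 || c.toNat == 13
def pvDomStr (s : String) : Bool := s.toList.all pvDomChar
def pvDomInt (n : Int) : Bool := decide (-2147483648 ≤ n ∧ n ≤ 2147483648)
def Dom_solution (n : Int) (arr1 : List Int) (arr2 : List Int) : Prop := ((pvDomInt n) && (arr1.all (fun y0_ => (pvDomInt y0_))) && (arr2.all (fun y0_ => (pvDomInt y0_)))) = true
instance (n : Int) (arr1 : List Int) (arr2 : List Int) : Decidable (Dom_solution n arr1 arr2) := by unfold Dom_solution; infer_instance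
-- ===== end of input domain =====

-- B masks each merged row to n bits and renders it via binary string formatting
-- (format to a zero-padded bit string, then a character translation), instead of
-- A's per-bit (1<<i)&bit loop building the string backwards and reversing it.

-- ===== PORT A =====
-- Python str values under construction are represented as List Char; arr1[y]/arr2[y] are
-- ported with pyGetD (Pre_ guarantees every accessed index is in range, where Python returns).
def solution (n : Int) (arr1 : List Int) (arr2 : List Int) : List String :=
  (PySem.List.pyRange 0 n 1).foldl
    (fun ans y =>
      let _total : Int := ((1 : Int) <<< n.toNat) - 1   -- A computes `total` and never uses it
      let bit : Int := PySem.Int.bor (PySem.List.pyGetD arr1 y 0) (PySem.List.pyGetD arr2 y 0)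
      let st : List Char :=
        (PySem.List.pyRange 0 n 1).foldl
          (fun st i => if PySem.Int.band ((1 : Int) <<< i.toNat) bit ≠ 0 then st ++ ['#'] else st ++ [' '])
          []
      ans ++ [String.ofList ((PySem.List.slice? st none none (-1)).getD [])])   -- st[::-1]
    []

-- ===== PORT B =====
-- hand port of Python's format(v, 'b') for v ≥ 0 (exact there): binary digits, MSB first
def goBin (v : Nat) : List Char :=
  match v with
  | 0 => []
  | w + 1 => goBin ((w + 1) / 2) ++ [if (w + 1) % 2 = 1 then '1' else '0']
  decreasing_by exact Nat.div_lt_self (Nat.succ_pos w) one_lt_two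

-- format(v, '0{n}b'): '0' for v = 0, else its binary digits, left-padded with '0' to width n
def binFmt (v : Nat) (n : Nat) : List Char :=
  let s := if v = 0 then ['0'] else goBin v
  List.replicate (n - s.length) '0' ++ s

-- str.maketrans("01", " #") applied to one character
def trChar (c : Char) : Char := if c = '1' then '#' else if c = '0' then ' ' else c

def solution_alt (n : Int) (arr1 : List Int) (arr2 : List Int) : List String :=
  if n ≤ 0 then []
  else
    let mask : Int := ((1 : Int) <<< n.toNat) - 1
    ((PySem.List.slice arr1 none (some n)).zip (PySem.List.slice arr2 none (some n))).map
      (fun p =>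
        String.ofList ((binFmt (PySem.Int.band (PySem.Int.bor p.1 p.2) mask).toNat n.toNat).map trChar))

-- ===== PRECONDITION & SPEC =====
-- A raises IndexError exactly when some y in range(n) is out of range of arr1 or arr2.
def Pre_solution (n : Int) (arr1 : List Int) (arr2 : List Int) : Prop :=
  n ≤ (arr1.length : Int) ∧ n ≤ (arr2.length : Int)
instance (n : Int) (arr1 : List Int) (arr2 : List Int) : Decidable (Pre_solution n arr1 arr2) := by
  unfold Pre_solution; infer_instance

def pvWitness_solution : Int × List Int × List Int := (2, ([9, 20], [30, 1]))

def Spec_solution (n : Int) (arr1 : List Int) (arr2 : List Int) (out : List String) : Prop := out = solution_alt n arr1 arr2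
instance (n : Int) (arr1 : List Int) (arr2 : List Int) (out : List String) : Decidable (Spec_solution n arr1 arr2 out) := by unfold Spec_solution; infer_instance

-- ===== CLAIM (what is proved, stated in full; the proofs are below) =====
def Claim_equal_solution : Prop := ∀ (n : Int) (arr1 : List Int) (arr2 : List Int), Dom_solution n arr1 arr2 → Pre_solution n arr1 arr2 → Spec_solution n arr1 arr2 (solution n arr1 arr2)

-- ===== LEMMAS AND PROOFS =====

-- the Python truth test `(1 << k) & m` (canonicalized to 2^k) reads the k-th two's-complement bit of m
theorem band_two_pow_ne_zero (k : Nat) (m : Int) :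
    (PySem.Int.band ((2 : Int) ^ k) m ≠ 0) ↔ m.testBit k = true := by
  have hpow : ((2 : Int) ^ k) = ((2 ^ k : Nat) : Int) := by push_cast; ring
  rw [hpow]
  rcases m with a | a
  · have h0 : (0:Int) ≤ Int.ofNat a := Int.natCast_nonneg a
    simp only [PySem.Int.band, Int.natCast_nonneg, if_pos, h0, Int.toNat_natCast]
    rw [Nat.two_pow_and]
    rcases h : a.testBit k with _ | _ <;> simp [Int.testBit, h]
  · have h1 : ¬ ((0:Int) ≤ Int.negSucc a) := by
      rw [Int.negSucc_eq]; omega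
    have h2 : (-(Int.negSucc a) - 1).toNat = a := by
      rw [Int.negSucc_eq]; omega
    simp only [PySem.Int.band, Int.natCast_nonneg, if_pos, if_neg h1, h2, Int.toNat_natCast]
    rw [Nat.two_pow_and]
    rcases h : a.testBit k with _ | _ <;> simp [Int.testBit, h]

-- complement within n bits: (2^n - 1 - x) flips the low n bits of x
theorem sub_mask_testBit (n : Nat) : ∀ (x i : Nat), x < 2 ^ n → i < n →
    (2 ^ n - 1 - x).testBit i = !x.testBit i := by
  induction n with
  | zero => intro x i _ hi; omega
  | succ n ih =>
      intro x i hx hi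
      have hsplit : 2 ^ (n + 1) - 1 - x = 2 * (2 ^ n - 1 - x / 2) + (1 - x % 2) := by
        have h2 : x % 2 < 2 := Nat.mod_lt _ (by omega)
        have := Nat.div_add_mod x 2
        have hx2 : x / 2 < 2 ^ n := by
          have : 2 * (x / 2) ≤ x := by omega
          have hp : 2 ^ (n + 1) = 2 * 2 ^ n := by ring
          omega
        have hp : 2 ^ (n + 1) = 2 * 2 ^ n := by ring
        omega
      cases i with
      | zero =>
          simp only [Nat.testBit_zero]
          rw [hsplit]
          have h2 : x % 2 < 2 := Nat.mod_lt _ (by omega)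
          have h2' : x % 2 = 0 ∨ x % 2 = 1 := by omega
          rcases h2' with h | h <;> simp [Nat.mul_add_mod, h]
      | succ i =>
          rw [Nat.testBit_add_one, Nat.testBit_add_one, hsplit]
          have hdiv : (2 * (2 ^ n - 1 - x / 2) + (1 - x % 2)) / 2 = 2 ^ n - 1 - x / 2 := by
            have h2 : x % 2 < 2 := Nat.mod_lt _ (by omega)
            omega
          rw [hdiv]
          have hx2 : x / 2 < 2 ^ n := by
            have : 2 * (x / 2) ≤ x := by omega
            have hp : 2 ^ (n + 1) = 2 * 2 ^ n := by ring
            omega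
          exact ih (x / 2) i hx2 (by omega)

-- the low n bits of 2^n - 1 are all set
theorem mask_testBit (n i : Nat) (hi : i < n) : (2 ^ n - 1).testBit i = true := by
  have := sub_mask_testBit n 0 i (Nat.two_pow_pos n) hi
  simpa using this

-- Python's (m & ((1<<n)-1)): a Nat below 2^n whose low n bits are m's two's-complement bits
theorem band_mask_lt (m : Int) (n : Nat) :
    (PySem.Int.band m ((2 ^ n - 1 : Nat) : Int)).toNat < 2 ^ n := by
  have hpos : 0 < 2 ^ n := Nat.two_pow_pos n
  unfold PySem.Int.band
  rcases m with a | a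
  · rw [if_pos (by exact Int.natCast_nonneg a), if_pos (Int.natCast_nonneg _)]
    have := Nat.and_le_right (n := (Int.ofNat a).toNat) (m := ((2 ^ n - 1 : Nat) : Int).toNat)
    simp only [Int.toNat_natCast] at this ⊢
    omega
  · have h1 : ¬ ((0:Int) ≤ Int.negSucc a) := by rw [Int.negSucc_eq]; omega
    rw [if_neg h1, if_pos (Int.natCast_nonneg _)]
    simp only [Int.toNat_natCast]
    omega

theorem band_mask_testBit (m : Int) (n i : Nat) (hi : i < n) :
    (PySem.Int.band m ((2 ^ n - 1 : Nat) : Int)).toNat.testBit i = m.testBit i := by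
  have hpos : 0 < 2 ^ n := Nat.two_pow_pos n
  unfold PySem.Int.band
  rcases m with a | a
  · rw [if_pos (by exact Int.natCast_nonneg a), if_pos (Int.natCast_nonneg _)]
    simp only [Int.ofNat_eq_natCast, Int.toNat_natCast]
    rw [Nat.testBit_and, mask_testBit n i hi]
    simp [Int.testBit]
  · have h1 : ¬ ((0:Int) ≤ Int.negSucc a) := by rw [Int.negSucc_eq]; omega
    have h2 : (-(Int.negSucc a) - 1).toNat = a := by rw [Int.negSucc_eq]; omega
    rw [if_neg h1, if_pos (Int.natCast_nonneg _)]
    rw [h2]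
    simp only [Int.toNat_natCast]
    have hle : (2 ^ n - 1) &&& a ≤ 2 ^ n - 1 := Nat.and_le_left
    have h3 : (2 ^ n - 1 - ((2 ^ n - 1) &&& a)).testBit i = !((2 ^ n - 1) &&& a).testBit i :=
      sub_mask_testBit n _ i (by omega) hi
    rw [h3, Nat.testBit_and, mask_testBit n i hi]
    simp [Int.testBit]

-- the reference row: v's low n bits as '1'/'0' characters, MSB first
def bitsRef (n : Nat) (v : Nat) : List Char :=
  ((List.range n).map (fun i => if v.testBit i then '1' else '0')).reverse

theorem bitsRef_zero (n : Nat) : bitsRef n 0 = List.replicate n '0' := by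
  unfold bitsRef
  simp [List.map_const']

theorem bitsRef_succ (n : Nat) (v : Nat) :
    bitsRef (n + 1) v = bitsRef n (v / 2) ++ [if v.testBit 0 then '1' else '0'] := by
  unfold bitsRef
  rw [List.range_succ_eq_map, List.map_cons, List.reverse_cons, List.map_map]
  congr 2
  apply List.map_congr_left
  intro i _
  simp [Function.comp, Nat.testBit_add_one]

-- padded binary digits are exactly the reference row
theorem pad_goBin_eq_bitsRef (n : Nat) : ∀ v : Nat, v < 2 ^ n →
    List.replicate (n - (goBin v).length) '0' ++ goBin v = bitsRef n v := by
  induction n with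
  | zero =>
      intro v hv
      interval_cases v
      simp [goBin, bitsRef]
  | succ n ih =>
      intro v hv
      match v with
      | 0 =>
          rw [goBin]
          simp [bitsRef_zero]
      | w + 1 =>
          rw [goBin]
          have hlen : (goBin ((w + 1) / 2) ++ [if (w + 1) % 2 = 1 then '1' else '0']).length
              = (goBin ((w + 1) / 2)).length + 1 := by simp
          rw [hlen]
          have hdiv : (w + 1) / 2 < 2 ^ n := by
            have hp : 2 ^ (n + 1) = 2 * 2 ^ n := by ring
            omega
          have hrec := ih ((w + 1) / 2) hdiv
          rw [bitsRef_succ, ← hrec]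
          have hn : n + 1 - ((goBin ((w + 1) / 2)).length + 1) = n - (goBin ((w + 1) / 2)).length := by
            omega
          rw [hn, ← List.append_assoc]
          congr 1
          simp only [Nat.testBit_zero]
          rcases h : (w + 1) % 2 with _ | _ | _ <;> simp_all <;> omega

theorem binFmt_eq_bitsRef (n v : Nat) (hn : 1 ≤ n) (hv : v < 2 ^ n) :
    binFmt v n = bitsRef n v := by
  unfold binFmt
  match v with
  | 0 =>
      simp only [if_pos rfl, List.length_singleton]
      rw [bitsRef_zero]
      have : List.replicate n '0' = List.replicate (n - 1) '0' ++ List.replicate 1 '0' := by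
        rw [← List.replicate_add]
        congr 1
        omega
      rw [this]
      simp
  | w + 1 =>
      simp only [Nat.succ_ne_zero, if_neg]
      exact pad_goBin_eq_bitsRef n (w + 1) hv

-- A's inner loop appends one character per bit index
theorem foldl_ite_char (bit : Int) (l : List Int) (acc : List Char) :
    l.foldl (fun st i => if PySem.Int.band ((2 : Int) ^ i.toNat) bit ≠ 0 then st ++ ['#'] else st ++ [' ']) acc
      = acc ++ l.map (fun i => if PySem.Int.band ((2 : Int) ^ i.toNat) bit ≠ 0 then '#' else ' ') := by
  induction l generalizing acc with
  | nil => simp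
  | cons x xs ih =>
      simp only [List.foldl_cons, List.map_cons]
      rw [ih]
      split_ifs <;> simp

-- the Python mask (1<<n)-1 (canonicalized to 2^n - 1) as a Nat cast
theorem mask_cast (n : Nat) : ((2 : Int) ^ n) - 1 = ((2 ^ n - 1 : Nat) : Int) := by
  have hpos : 0 < 2 ^ n := Nat.two_pow_pos n
  have h : ((2 : Int) ^ n) = ((2 ^ n : Nat) : Int) := by push_cast; ring
  omega

-- A's reversed row string is B's formatted-and-translated row
theorem rowA_eq_rowB (n : Nat) (m : Int) (hn : 1 ≤ n) :
    (((List.range n).map (fun (k : Nat) => (k : Int))).map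
        (fun i => if PySem.Int.band ((2 : Int) ^ i.toNat) m ≠ 0 then '#' else ' ')).reverse
      = (binFmt (PySem.Int.band m ((2 : Int) ^ n - 1)).toNat n).map trChar := by
  rw [List.map_map, mask_cast]
  set v : Nat := (PySem.Int.band m ((2 ^ n - 1 : Nat) : Int)).toNat with hv
  rw [binFmt_eq_bitsRef n v hn (band_mask_lt m n)]
  unfold bitsRef
  rw [List.map_reverse]
  congr 1
  rw [List.map_map]
  apply List.map_congr_left
  intro i hi
  have hi' : i < n := List.mem_range.mp hi
  have hb := band_two_pow_ne_zero i m
  have hm : v.testBit i = m.testBit i := band_mask_testBit m n i hi'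
  simp only [Function.comp, trChar, Int.toNat_natCast]
  by_cases h : m.testBit i = true
  · rw [if_pos (hb.mpr h), hm, h]
    simp
  · rw [if_neg (fun hc => h (hb.mp hc)), hm]
    simp only [Bool.not_eq_true] at h
    rw [h]
    simp

theorem main_thm (n : Int) (arr1 : List Int) (arr2 : List Int)
    (h1 : n ≤ (arr1.length : Int)) (h2 : n ≤ (arr2.length : Int)) :
    solution n arr1 arr2 = solution_alt n arr1 arr2 := by
  by_cases hn : n ≤ 0
  · unfold solution solution_alt
    rw [if_pos hn]
    have h0 : ¬ (0:Int) < n := by omega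
    simp [PySem.List.pyRange, h0]
  · have hn' : 0 < n := by omega
    have hw1 : n.toNat ≤ arr1.length := by omega
    have hw2 : n.toNat ≤ arr2.length := by omega
    have hs1 : PySem.List.slice arr1 none (some n) = arr1.take n.toNat := by
      apply PySem.List.slice_to <;> omega
    have hs2 : PySem.List.slice arr2 none (some n) = arr2.take n.toNat := by
      apply PySem.List.slice_to <;> omega
    unfold solution solution_alt
    rw [if_neg hn]
    rw [hs1, hs2]
    -- canonicalize Python's 1 << k (either shift instance) to (2:Int)^k
    simp only [Int.one_shiftLeft, Int.shiftLeft_eq, one_mul, Nat.cast_pow, Nat.cast_ofNat]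
    simp only [PySem.List.foldl_append_singleton_eq_map, List.nil_append,
      PySem.List.slice?_none_none_neg_one, Option.getD_some]
    apply List.ext_getElem
    · simp [PySem.List.length_pyRange_one, List.length_zip, List.length_take]
      omega
    · intro k hk1 hk2
      have hk : k < n.toNat := by
        simp [PySem.List.length_pyRange_one] at hk1
        omega
      simp only [List.getElem_map, PySem.List.getElem_pyRange_one, List.getElem_zip,
        List.getElem_take]
      have hy : (0 : Int) + (k : Int) = ((k : Nat) : Int) := by omega
      rw [hy, PySem.List.pyGetD_natCast, PySem.List.pyGetD_natCast]
      rw [List.getD_eq_getElem _ _ (by omega), List.getD_eq_getElem _ _ (by omega)]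
      congr 1
      rw [PySem.List.pyRange_zero, foldl_ite_char, List.nil_append]
      exact rowA_eq_rowB n.toNat (PySem.Int.bor arr1[k] arr2[k]) (by omega)

-- ===== VERDICT (by name: the statement is the Claim_ definition above) =====
theorem solution_spec : Claim_equal_solution := by
  intro n arr1 arr2 _ hpre
  unfold Spec_solution
  exact main_thm n arr1 arr2 hpre.1 hpre.2
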